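-- pv_equiv track=rewrite | github.com/PlumpMath/ClausewitzBlenderPlugin | import-export-clausewitz/utils.py | TransposeCoordinateArray2D
-- ===== SOURCE A (Python) =====
-- def my_range(start, end, step):
--     while start <= end:
--         yield start
--         start += step
--
-- def TransposeCoordinateArray2D(data):
--     result = []
--
--     if len(data) % 2 == 0:
--         for i in my_range(0, len(data) - 2, 2):
--             result.append([data[i], data[i + 1]])
--
--         return result
--     else:
--         return result
-- ===== SOURCE B (Python) =====
-- def TransposeCoordinateArray2D(data):
--     if len(data) % 2 == 0:
--         return [[a, b] for a, b in zip(data[0::2], data[1::2])]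
--     else:
--         return []
-- ===== Notes on version B (the rewrite author's own statement) =====
-- stated objective: idiomatic
-- what changed: Replaced the custom generator + index-arithmetic loop with a comprehension zipping the two strided slices data[0::2] and data[1::2], keeping the even-length guard.
import Mathlib
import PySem

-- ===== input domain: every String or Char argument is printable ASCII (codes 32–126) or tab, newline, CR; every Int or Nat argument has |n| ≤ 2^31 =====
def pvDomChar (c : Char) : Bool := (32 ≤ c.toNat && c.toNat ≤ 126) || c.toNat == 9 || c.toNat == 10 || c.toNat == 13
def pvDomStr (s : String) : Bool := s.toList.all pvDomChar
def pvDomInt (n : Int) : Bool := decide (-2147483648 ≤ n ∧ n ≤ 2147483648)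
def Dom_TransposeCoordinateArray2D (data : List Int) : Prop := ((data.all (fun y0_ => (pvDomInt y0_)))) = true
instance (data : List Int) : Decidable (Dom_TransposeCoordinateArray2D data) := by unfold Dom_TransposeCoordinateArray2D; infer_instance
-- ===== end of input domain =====

-- B replaces A's custom generator + index-arithmetic loop by zipping the two strided
-- slices data[0::2] and data[1::2] (idiomatic; same cost).

-- ===== PORT A =====
-- my_range is only called with step = 2; ported with that step (the while-loop 'start <= end').
def myRange2 (s e : Int) : List Int :=
  if s ≤ e then s :: myRange2 (s + 2) e else []
termination_by (e + 1 - s).toNat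
decreasing_by omega

-- data[i] / data[i+1]: every i produced by the loop is in range on even-length data,
-- so pyGetD (pyGet? with a default) is exact here.
def TransposeCoordinateArray2D (data : List Int) : List (List Int) :=
  if data.length % 2 == 0 then
    (myRange2 0 ((data.length : Int) - 2)).foldl
      (fun result i =>
        result ++ [[PySem.List.pyGetD data i 0, PySem.List.pyGetD data (i + 1) 0]]) []
  else []

-- ===== PORT B =====
-- zip(data[0::2], data[1::2]); step 2 ≠ 0 so slice? is always `some`.
def TransposeCoordinateArray2D_alt (data : List Int) : List (List Int) :=
  if data.length % 2 == 0 then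
    (((PySem.List.slice? data (some 0) none 2).getD []).zip
      ((PySem.List.slice? data (some 1) none 2).getD [])).map (fun p => [p.1, p.2])
  else []

-- ===== PRECONDITION & SPEC =====
def Spec_TransposeCoordinateArray2D (data : List Int) (out : List (List Int)) : Prop := out = TransposeCoordinateArray2D_alt data
instance (data : List Int) (out : List (List Int)) : Decidable (Spec_TransposeCoordinateArray2D data out) := by unfold Spec_TransposeCoordinateArray2D; infer_instance

-- ===== CLAIM (what is proved, stated in full; the proofs are below) =====
def Claim_equal_TransposeCoordinateArray2D : Prop := ∀ (data : List Int), Dom_TransposeCoordinateArray2D data → Spec_TransposeCoordinateArray2D data (TransposeCoordinateArray2D data)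

-- ===== LEMMAS AND PROOFS =====

-- the even-indexed elements of a list
def pvEvens {α : Type} : List α → List α
  | [] => []
  | [a] => [a]
  | a :: _ :: t => a :: pvEvens t

-- pairing the list up two at a time (common value of both sides on even-length input)
def pvPairUp : List Int → List (List Int)
  | a :: b :: t => [a, b] :: pvPairUp t
  | _ => []

theorem pvFilterMap_cons2 {α : Type} (c : Nat) (a b : α) (t : List α) :
    List.filterMap (fun k => (a :: b :: t)[2 * k]?) (List.range (c + 1))
      = a :: List.filterMap (fun k => t[2 * k]?) (List.range c) := by
  rw [List.range_succ_eq_map]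
  have h : ∀ k : Nat, (a :: b :: t)[2 * Nat.succ k]? = t[2 * k]? := by
    intro k
    have : 2 * Nat.succ k = 2 * k + 1 + 1 := by omega
    rw [this]
    simp
  simp [List.filterMap_map, h]

theorem pvEvens_filterMap {α : Type} : ∀ (xs : List α),
    List.filterMap (fun k => xs[2 * k]?) (List.range ((xs.length + 1) / 2)) = pvEvens xs := by
  intro xs
  induction xs using pvEvens.induct with
  | case1 => simp [pvEvens]
  | case2 a => simp [pvEvens, List.range_succ_eq_map]
  | case3 a b t ih =>
    have hlen : ((a :: b :: t).length + 1) / 2 = (t.length + 1) / 2 + 1 := by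
      simp only [List.length_cons]; omega
    rw [hlen, pvFilterMap_cons2, ih, pvEvens]

theorem pvSlice02 {α : Type} (xs : List α) :
    PySem.List.slice? xs (some 0) none 2 = some (pvEvens xs) := by
  rw [← pvEvens_filterMap xs]
  simp only [PySem.List.slice?, PySem.List.sliceIndices]
  simp only [show ¬((2:Int) = 0) by omega, if_false]
  norm_num
  have hc : (if 0 < xs.length then (((xs.length : Int) + 2 - 1) / 2).toNat else 0)
      = (xs.length + 1) / 2 := by split_ifs <;> omega
  have hf : (fun k : Nat => xs[(2 * (k:Int)).toNat]?) = (fun k : Nat => xs[2 * k]?) := by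
    funext k
    have h1 : (2 * (k:Int)).toNat = 2 * k := by omega
    rw [h1]
  rw [hc, hf]

theorem pvSlice12 (xs : List Int) :
    PySem.List.slice? xs (some 1) none 2 = some (pvEvens xs.tail) := by
  cases xs with
  | nil => decide
  | cons a t =>
    rw [show (a :: t).tail = t from rfl, ← pvEvens_filterMap t]
    simp only [PySem.List.slice?, PySem.List.sliceIndices]
    simp only [show ¬((2:Int) = 0) by omega, if_false]
    norm_num
    have hc : (if 0 < t.length then (((t.length : Int) + 2 - 1) / 2).toNat else 0)
        = (t.length + 1) / 2 := by split_ifs <;> omega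
    have hf : (fun k : Nat => (a :: t)[((1:Int) + 2 * (k:Int)).toNat]?)
        = (fun k : Nat => t[2 * k]?) := by
      funext k
      have h1 : ((1:Int) + 2 * (k:Int)).toNat = 2 * k + 1 := by omega
      rw [h1]
      simp
    rw [hc, hf]

theorem pvEvens_cons {α : Type} (b : α) (t : List α) :
    pvEvens (b :: t) = b :: pvEvens t.tail := by
  cases t <;> rfl

theorem pvZip_pairUp : ∀ (l : List Int), l.length % 2 = 0 →
    ((pvEvens l).zip (pvEvens l.tail)).map (fun p => [p.1, p.2]) = pvPairUp l := by
  intro l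
  induction l using pvPairUp.induct with
  | case1 a b t ih =>
    intro h
    simp only [List.length_cons] at h
    have ht : t.length % 2 = 0 := by omega
    rw [List.tail_cons, show pvEvens (a :: b :: t) = a :: pvEvens t from rfl,
      pvEvens_cons b t, List.zip_cons_cons, List.map_cons, ih ht]
    rfl
  | case2 l h =>
    intro hl
    cases l with
    | nil => rfl
    | cons a t =>
      cases t with
      | nil => simp at hl
      | cons b t' => exact (h a b t' rfl).elim

theorem pvMyRange2_shift_aux : ∀ (n : Nat) (s e c : Int), (e + 1 - s).toNat ≤ n →
    myRange2 (s + c) (e + c) = (myRange2 s e).map (· + c) := by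
  intro n
  induction n with
  | zero =>
    intro s e c h
    rw [myRange2, if_neg (by omega), myRange2, if_neg (by omega)]
    rfl
  | succ n ih =>
    intro s e c h
    by_cases hle : s ≤ e
    · conv_lhs => rw [myRange2]
      conv_rhs => rw [myRange2]
      rw [if_pos (by omega : s + c ≤ e + c), if_pos hle, List.map_cons,
        show s + c + 2 = s + 2 + c by ring, ih (s + 2) e c (by omega)]
    · conv_lhs => rw [myRange2]
      conv_rhs => rw [myRange2]
      rw [if_neg (by omega : ¬ s + c ≤ e + c), if_neg hle]
      rfl

theorem pvMyRange2_shift (s e c : Int) :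
    myRange2 (s + c) (e + c) = (myRange2 s e).map (· + c) :=
  pvMyRange2_shift_aux (e + 1 - s).toNat s e c le_rfl

theorem pvMem_myRange2_aux : ∀ (n : Nat) (s e i : Int), (e + 1 - s).toNat ≤ n →
    i ∈ myRange2 s e → s ≤ i := by
  intro n
  induction n with
  | zero =>
    intro s e i h hi
    rw [myRange2, if_neg (by omega)] at hi
    simp at hi
  | succ n ih =>
    intro s e i h hi
    by_cases hle : s ≤ e
    · rw [myRange2, if_pos hle] at hi
      rcases List.mem_cons.mp hi with h1 | h1
      · omega
      · have := ih (s + 2) e i (by omega) h1; omega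
    · rw [myRange2, if_neg hle] at hi
      simp at hi

theorem pvMem_myRange2 (s e i : Int) (h : i ∈ myRange2 s e) : s ≤ i :=
  pvMem_myRange2_aux (e + 1 - s).toNat s e i le_rfl h

theorem pvGetD_cons_succ (a : Int) (xs : List Int) (i : Int) (h : 0 ≤ i) (d : Int) :
    PySem.List.pyGetD (a :: xs) (i + 1) d = PySem.List.pyGetD xs i d := by
  simp only [PySem.List.pyGetD, PySem.List.pyGet?, PySem.List.pyIdx?, List.length_cons]
  split_ifs with h1 h2 h3 h4 <;> try omega
  · have : (i + 1).toNat = i.toNat + 1 := by omega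
    rw [this]; simp
  · rfl

theorem pvA_eq_pairUp : ∀ (l : List Int), l.length % 2 = 0 →
    (myRange2 0 ((l.length : Int) - 2)).map
      (fun i => [PySem.List.pyGetD l i 0, PySem.List.pyGetD l (i + 1) 0]) = pvPairUp l := by
  intro l
  induction l using pvPairUp.induct with
  | case1 a b t ih =>
    intro h
    simp only [List.length_cons] at h ⊢
    have ht : t.length % 2 = 0 := by omega
    have he : (((t.length + 1 + 1 : Nat)) : Int) - 2 = (t.length : Int) := by push_cast; ring
    rw [he, myRange2, if_pos (by omega : (0:Int) ≤ (t.length : Int)),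
      show (0:Int) + 2 = 0 + 2 by rfl,
      show (t.length : Int) = ((t.length : Int) - 2) + 2 by ring,
      pvMyRange2_shift 0 ((t.length : Int) - 2) 2, List.map_cons, List.map_map]
    have hfa : PySem.List.pyGetD (a :: b :: t) 0 0 = a := by
      rw [show (0:Int) = ((0:Nat):Int) by norm_num, PySem.List.pyGetD_natCast]; rfl
    have hfb : PySem.List.pyGetD (a :: b :: t) (0 + 1) 0 = b := by
      rw [show (0:Int) + 1 = ((1:Nat):Int) by norm_num, PySem.List.pyGetD_natCast]; rfl
    rw [hfa, hfb, show pvPairUp (a :: b :: t) = [a, b] :: pvPairUp t from rfl]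
    congr 1
    rw [← ih ht]
    apply List.map_congr_left
    intro i hi
    have h0 : 0 ≤ i := pvMem_myRange2 0 _ i hi
    simp only [Function.comp_apply]
    have e2 : i + 2 = (i + 1) + 1 := by ring
    rw [e2,
      pvGetD_cons_succ a (b :: t) (i + 1) (by omega) 0,
      pvGetD_cons_succ b t i (by omega) 0,
      pvGetD_cons_succ a (b :: t) (i + 1 + 1) (by omega) 0,
      pvGetD_cons_succ b t (i + 1) (by omega) 0]
  | case2 l h =>
    intro hl
    cases l with
    | nil => rw [myRange2, if_neg (by norm_num)]; rfl
    | cons a t =>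
      cases t with
      | nil => simp at hl
      | cons b t' => exact (h a b t' rfl).elim

-- ===== VERDICT (by name: the statement is the Claim_ definition above) =====
theorem TransposeCoordinateArray2D_spec : Claim_equal_TransposeCoordinateArray2D := by
  intro data _
  unfold Spec_TransposeCoordinateArray2D TransposeCoordinateArray2D TransposeCoordinateArray2D_alt
  by_cases h : data.length % 2 = 0
  · simp only [h, beq_self_eq_true, if_pos]
    rw [PySem.List.foldl_append_singleton_eq_map, List.nil_append,
      pvSlice02, pvSlice12, Option.getD_some, Option.getD_some,
      pvZip_pairUp data h, pvA_eq_pairUp data h]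
  · simp [h]
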